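-- pv_equiv track=rewrite | github.com/BradleyExton/canpoli-api | canpoli/cli/ingest_boundaries.py | _pick_field
-- ===== SOURCE A (Python) =====
-- from typing import Any
--
-- def _pick_field(
--     features: list[dict[str, Any]],
--     explicit_field: str | None,
--     candidates: list[str],
-- ) -> str | None:
--     if explicit_field:
--         for feature in features:
--             props = feature.get("properties") or {}
--             if explicit_field in props:
--                 return explicit_field
--         return None
--     for field in candidates:
--         for feature in features:
--             props = feature.get("properties") or {}
--             if field in props:
--                 return field
--     return None
-- ===== SOURCE B (Python) =====
-- def _pick_field(features, explicit_field, candidates):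
--     keys = set()
--     for feature in features:
--         keys.update(feature.get("properties") or {})
--     wanted = [explicit_field] if explicit_field else candidates
--     for field in wanted:
--         if field in keys:
--             return field
--     return None
-- ===== Notes on version B (the rewrite author's own statement) =====
-- stated objective: alternative
-- what changed: B collects all property keys into a set in one pass over the features, then scans the priority list (the explicit field or the candidates) once for the first member of that set, instead of rescanning every feature for each candidate.
import Mathlib
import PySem

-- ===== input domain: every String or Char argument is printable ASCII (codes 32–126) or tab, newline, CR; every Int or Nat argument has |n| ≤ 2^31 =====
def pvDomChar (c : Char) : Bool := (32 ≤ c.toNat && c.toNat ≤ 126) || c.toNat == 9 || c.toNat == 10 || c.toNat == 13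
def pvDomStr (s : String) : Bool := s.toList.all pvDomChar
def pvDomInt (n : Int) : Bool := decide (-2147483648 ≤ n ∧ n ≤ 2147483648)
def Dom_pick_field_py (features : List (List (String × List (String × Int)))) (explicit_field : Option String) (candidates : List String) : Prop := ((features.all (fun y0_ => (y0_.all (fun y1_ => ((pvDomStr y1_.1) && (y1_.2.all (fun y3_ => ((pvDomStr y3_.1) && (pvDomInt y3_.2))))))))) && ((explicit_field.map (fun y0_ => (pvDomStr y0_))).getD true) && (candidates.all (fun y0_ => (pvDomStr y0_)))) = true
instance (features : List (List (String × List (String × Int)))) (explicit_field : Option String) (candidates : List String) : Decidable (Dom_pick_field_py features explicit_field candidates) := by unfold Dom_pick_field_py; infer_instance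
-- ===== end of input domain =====

-- B builds the set of all property keys in one pass over the features, then scans the
-- priority list once, instead of rescanning the features for each candidate (objective: alternative).

-- ===== PORT A =====
-- props = feature.get("properties") or {}   (missing key or empty dict both give {})
def pvPropsA (feature : List (String × List (String × Int))) : List (String × Int) :=
  match feature.find? (fun p => p.1 == "properties") with
  | some p => p.2
  | none => []

-- 'for feature in features: … if explicit_field in props: return explicit_field' then 'return None'
def pvExplicitLoop (e : String) : List (List (String × List (String × Int))) → Option String
  | [] => none
  | feat :: rest =>
      if (pvPropsA feat).any (fun p => p.1 == e) then some e else pvExplicitLoop e rest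

-- inner 'for feature in features: … if field in props: return field' (Bool: did it return?)
def pvFeatLoop (f : String) : List (List (String × List (String × Int))) → Bool
  | [] => false
  | feat :: rest =>
      if (pvPropsA feat).any (fun p => p.1 == f) then true else pvFeatLoop f rest

-- outer 'for field in candidates: …' then 'return None'
def pvCandLoop (features : List (List (String × List (String × Int)))) : List String → Option String
  | [] => none
  | f :: rest => if pvFeatLoop f features then some f else pvCandLoop features rest

def pick_field_py (features : List (List (String × List (String × Int)))) (explicit_field : Option String) (candidates : List String) : Option String :=
  match explicit_field with
  | some e => if e ≠ "" then pvExplicitLoop e features else pvCandLoop features candidates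
  | none => pvCandLoop features candidates

-- ===== PORT B =====
-- feature.get("properties") or {} is the same expression as in A: reuse pvPropsA
-- keys = set(); for feature in features: keys.update(feature.get("properties") or {})
def pvKeySet (features : List (List (String × List (String × Int)))) : PySem.Set String :=
  features.foldl (fun s feat => PySem.Set.update s ((pvPropsA feat).map (·.1))) PySem.Set.empty

def pick_field_py_alt (features : List (List (String × List (String × Int)))) (explicit_field : Option String) (candidates : List String) : Option String :=
  let keys := pvKeySet features
  let wanted := match explicit_field with
    | some e => if e ≠ "" then [e] else candidates
    | none => candidates
  wanted.find? (fun f => PySem.Set.contains keys f)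

-- ===== PRECONDITION & SPEC =====
def Spec_pick_field_py (features : List (List (String × List (String × Int)))) (explicit_field : Option String) (candidates : List String) (out : Option String) : Prop := out = pick_field_py_alt features explicit_field candidates
instance (features : List (List (String × List (String × Int)))) (explicit_field : Option String) (candidates : List String) (out : Option String) : Decidable (Spec_pick_field_py features explicit_field candidates out) := by unfold Spec_pick_field_py; infer_instance

-- ===== CLAIM (what is proved, stated in full; the proofs are below) =====
def Claim_equal_pick_field_py : Prop := ∀ (features : List (List (String × List (String × Int)))) (explicit_field : Option String) (candidates : List String), Dom_pick_field_py features explicit_field candidates → Spec_pick_field_py features explicit_field candidates (pick_field_py features explicit_field candidates)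

-- ===== LEMMAS AND PROOFS =====

-- membership in the key set = A's inner feature scan
lemma mem_keySet (features : List (List (String × List (String × Int)))) (f : String) :
    PySem.Set.contains (pvKeySet features) f = pvFeatLoop f features := by
  suffices h : ∀ (s : PySem.Set String),
      PySem.Set.contains
        (features.foldl (fun s feat => PySem.Set.update s ((pvPropsA feat).map (·.1))) s) f
      = (PySem.Set.contains s f || pvFeatLoop f features) by
    simpa [pvKeySet, PySem.Set.empty] using h PySem.Set.empty
  induction features with
  | nil => intro s; simp [pvFeatLoop]
  | cons feat rest ih =>
      intro s
      rw [List.foldl_cons, ih]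
      have hupd : PySem.Set.contains (PySem.Set.update s ((pvPropsA feat).map (·.1))) f
          = (PySem.Set.contains s f || (pvPropsA feat).any (fun p => p.1 == f)) := by
        rw [Bool.eq_iff_iff]
        simp [PySem.Set.mem_update, List.any_eq_true, List.mem_map]
      rw [hupd, pvFeatLoop]
      by_cases h : (pvPropsA feat).any (fun p => p.1 == f) = true <;> simp [h]

lemma candLoop_eq_find (features : List (List (String × List (String × Int)))) (cands : List String) :
    pvCandLoop features cands = cands.find? (fun f => PySem.Set.contains (pvKeySet features) f) := by
  induction cands with
  | nil => rfl
  | cons f rest ih =>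
      rw [pvCandLoop, List.find?_cons, mem_keySet]
      by_cases h : pvFeatLoop f features = true <;> simp [h, ih]

lemma explicitLoop_eq (e : String) (features : List (List (String × List (String × Int)))) :
    pvExplicitLoop e features = if pvFeatLoop e features then some e else none := by
  induction features with
  | nil => rfl
  | cons feat rest ih =>
      rw [pvExplicitLoop, pvFeatLoop]
      by_cases h : (pvPropsA feat).any (fun p => p.1 == e) = true <;> simp [h, ih]

-- ===== VERDICT (by name: the statement is the Claim_ definition above) =====
theorem pick_field_py_spec : Claim_equal_pick_field_py := by
  intro features explicit_field candidates _
  unfold Spec_pick_field_py pick_field_py pick_field_py_alt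
  cases explicit_field with
  | none => exact candLoop_eq_find features candidates
  | some e =>
      dsimp only
      split_ifs with he
      · rw [explicitLoop_eq, List.find?_cons, mem_keySet]
        by_cases h : pvFeatLoop e features = true <;> simp [h]
      · exact candLoop_eq_find features candidates
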